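-- pv_equiv track=rewrite | github.com/eamars/KazusaAIChatbot | src/kazusa_ai_chatbot/rag/recall_agent.py | _conflict_notes
-- ===== SOURCE A (Python) =====
-- _CONFLICT_LIMIT = 5
--
-- def _has_source_conflict(candidates: list[dict[str, str]]) -> bool:
--     """Detect source-level disagreement before using transcript proof."""
--
--     source_claims: dict[str, str] = {}
--     for candidate in candidates:
--         source = candidate["source"]
--         if source == "conversation_history" or source in source_claims:
--             continue
--         source_claims[source] = candidate["claim"].casefold()
--
--     if len(source_claims) <= 1:
--         return False
--
--     distinct_claims = set(source_claims.values())
--     return_value = len(distinct_claims) > 1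
--     return return_value
--
-- def _conflict_notes(candidates: list[dict[str, str]]) -> list[str]:
--     """Create compact conflict notes from candidate source disagreement."""
--
--     if not _has_source_conflict(candidates):
--         return_value: list[str] = []
--         return return_value
--
--     notes: list[str] = []
--     seen_sources: set[str] = set()
--     for candidate in candidates:
--         source = candidate["source"]
--         if source in seen_sources or source == "conversation_history":
--             continue
--         seen_sources.add(source)
--         notes.append(f"{source}: {candidate['claim']}")
--         if len(notes) >= _CONFLICT_LIMIT:
--             break
--     return notes
-- ===== SOURCE B (Python) =====
-- def _conflict_notes(candidates):
--     """Create compact conflict notes from candidate source disagreement."""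
--     notes, claims = _walk(candidates, ())
--     if claims and any(claim != claims[0] for claim in claims[1:]):
--         return notes[:5]
--     return []
--
--
-- def _walk(candidates, seen):
--     """Recursively collect (formatted note, casefolded claim) for each first
--     occurrence of a non-history source, in candidate order."""
--     if not candidates:
--         return [], []
--     head = candidates[0]
--     source = head["source"]
--     if source == "conversation_history" or source in seen:
--         return _walk(candidates[1:], seen)
--     notes, claims = _walk(candidates[1:], seen + (source,))
--     return [f"{source}: {head['claim']}"] + notes, [head["claim"].casefold()] + claims
-- ===== Notes on version B (the rewrite author's own statement) =====
-- stated objective: alternative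
-- what changed: Replaces A's dict/set machinery and two separate scans by a single recursive walk (no dict) that collects notes and casefolded claims together, and decides conflict by comparing every claim against the first one instead of counting distinct values in a set.
import Mathlib
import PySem

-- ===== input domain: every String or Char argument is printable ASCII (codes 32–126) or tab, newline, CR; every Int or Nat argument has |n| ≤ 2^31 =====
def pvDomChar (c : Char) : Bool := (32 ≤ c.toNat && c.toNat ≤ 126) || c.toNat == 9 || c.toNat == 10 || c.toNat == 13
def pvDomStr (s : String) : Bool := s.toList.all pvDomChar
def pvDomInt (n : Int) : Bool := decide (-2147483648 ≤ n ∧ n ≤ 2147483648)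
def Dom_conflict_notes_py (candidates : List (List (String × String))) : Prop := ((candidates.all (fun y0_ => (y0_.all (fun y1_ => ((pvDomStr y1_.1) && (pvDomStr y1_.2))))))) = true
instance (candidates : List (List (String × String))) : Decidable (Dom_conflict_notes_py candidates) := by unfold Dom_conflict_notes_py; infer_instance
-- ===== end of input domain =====

-- B replaces A's dict/set machinery and two separate scans by one recursive walk (no dict)
-- collecting notes and casefolded claims together, and decides conflict by comparing each
-- claim against the first one instead of counting a set of distinct values (objective: alternative).

-- ===== PORT A =====
-- candidate[k]: each candidate dict is modelled via PySem.Dict.ofList (duplicate keys overwrite,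
-- exactly like building the Python dict).  The KeyError on a missing key is excluded by Pre_; the
-- `.getD ""` total form is only reached outside Pre_.
def pvGetKey (c : List (String × String)) (k : String) : String :=
  ((PySem.Dict.ofList c).get? k).getD ""

-- str.casefold is ported as PySem.Str.lower: exact on the printable-ASCII domain Dom.
def pvLoop1A : List (List (String × String)) → PySem.Dict String String → PySem.Dict String String
  | [], sc => sc
  | c :: rest, sc =>
    let source := pvGetKey c "source"
    if source == "conversation_history" || sc.contains source then pvLoop1A rest sc
    else pvLoop1A rest (sc.insert source (PySem.Str.lower (pvGetKey c "claim")))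

def has_source_conflict_py (candidates : List (List (String × String))) : Bool :=
  let source_claims := pvLoop1A candidates PySem.Dict.empty
  if source_claims.size ≤ 1 then false
  else decide (1 < (PySem.Set.ofList source_claims.values).length)

def pvLoop2A : List (List (String × String)) → PySem.Set String → List String → List String
  | [], _, notes => notes
  | c :: rest, seen, notes =>
    let source := pvGetKey c "source"
    if seen.contains source || source == "conversation_history" then pvLoop2A rest seen notes
    else
      let notes' := notes ++ [source ++ ": " ++ pvGetKey c "claim"]
      if 5 ≤ notes'.length then notes'
      else pvLoop2A rest (PySem.Set.add seen source) notes'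

def conflict_notes_py (candidates : List (List (String × String))) : List String :=
  if !(has_source_conflict_py candidates) then []
  else pvLoop2A candidates PySem.Set.empty []

-- ===== PORT B =====
-- B's recursive _walk: returns (notes of every first-occurrence non-history source, in order,
-- untruncated; their casefolded claims).  seen is B's tuple of sources, ported as a list.
def pvWalkB : List (List (String × String)) → List String → List String × List String
  | [], _ => ([], [])
  | c :: rest, seen =>
    let source := pvGetKey c "source"
    if source == "conversation_history" || seen.contains source then pvWalkB rest seen
    else
      let (notes, claims) := pvWalkB rest (seen ++ [source])
      ((source ++ ": " ++ pvGetKey c "claim") :: notes,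
       PySem.Str.lower (pvGetKey c "claim") :: claims)

def conflict_notes_py_alt (candidates : List (List (String × String))) : List String :=
  let (notes, claims) := pvWalkB candidates []
  match claims with
  | [] => []
  | c0 :: rest => if rest.any (fun c => c != c0) then notes.take 5 else []

-- ===== PRECONDITION & SPEC =====
-- Exactly the inputs on which the Python A returns (no KeyError): every candidate has key "source",
-- and every candidate that is the first occurrence of a non-"conversation_history" source has key "claim".
def Pre_conflict_notes_py (candidates : List (List (String × String))) : Prop :=
  (∀ c ∈ candidates, (PySem.Dict.ofList c).contains "source" = true) ∧
  (∀ i : Fin candidates.length,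
    (pvGetKey candidates[i] "source" ≠ "conversation_history" ∧
     ∀ j : Fin candidates.length, (j : Nat) < (i : Nat) →
       pvGetKey candidates[j] "source" ≠ pvGetKey candidates[i] "source") →
    (PySem.Dict.ofList candidates[i]).contains "claim" = true)
instance (candidates : List (List (String × String))) : Decidable (Pre_conflict_notes_py candidates) := by
  unfold Pre_conflict_notes_py; infer_instance

def pvWitness_conflict_notes_py : (List (List (String × String))) :=
  [[("source", "wiki"), ("claim", "Yes")], [("source", "faq"), ("claim", "No")]]

def Spec_conflict_notes_py (candidates : List (List (String × String))) (out : List String) : Prop := out = conflict_notes_py_alt candidates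
instance (candidates : List (List (String × String))) (out : List String) : Decidable (Spec_conflict_notes_py candidates out) := by unfold Spec_conflict_notes_py; infer_instance

-- ===== CLAIM (what is proved, stated in full; the proofs are below) =====
def Claim_equal_conflict_notes_py : Prop := ∀ (candidates : List (List (String × String))), Dom_conflict_notes_py candidates → Pre_conflict_notes_py candidates → Spec_conflict_notes_py candidates (conflict_notes_py candidates)

-- ===== LEMMAS AND PROOFS =====

-- The common skeleton of both programs: the first-occurrence (source, original claim) pairs,
-- in candidate order, given the sources already seen.
def pvPairs : List (List (String × String)) → List String → List (String × String)
  | [], _ => []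
  | c :: rest, seen =>
    let source := pvGetKey c "source"
    if source == "conversation_history" || seen.contains source then pvPairs rest seen
    else (source, pvGetKey c "claim") :: pvPairs rest (seen ++ [source])

theorem walk_eq_pairs (cs : List (List (String × String))) :
    ∀ seen, pvWalkB cs seen =
      ((pvPairs cs seen).map (fun p => p.1 ++ ": " ++ p.2),
       (pvPairs cs seen).map (fun p => PySem.Str.lower p.2)) := by
  induction cs with
  | nil => intro seen; rfl
  | cons c rest ih =>
    intro seen
    simp only [pvWalkB, pvPairs]
    by_cases h : (pvGetKey c "source" == "conversation_history" || seen.contains (pvGetKey c "source")) = true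
    · rw [if_pos h, if_pos h, ih]
    · rw [if_neg h, if_neg h, ih]
      simp

-- A's first loop, run from a dict whose key membership matches `seen`, appends the lowered pairs.
theorem loop1_items (cs : List (List (String × String))) :
    ∀ (d : PySem.Dict String String) (seen : List String),
      (∀ s, d.contains s = seen.contains s) →
      (pvLoop1A cs d).items = d.items ++ (pvPairs cs seen).map (fun p => (p.1, PySem.Str.lower p.2)) := by
  induction cs with
  | nil => intro d seen _; simp [pvLoop1A, pvPairs]
  | cons c rest ih =>
    intro d seen hmem
    simp only [pvLoop1A, pvPairs]
    by_cases h : (pvGetKey c "source" == "conversation_history" || seen.contains (pvGetKey c "source")) = true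
    · rw [if_pos (by rw [hmem]; exact h), if_pos h]
      exact ih d seen hmem
    · rw [if_neg (by rw [hmem]; exact h), if_neg h]
      have hnc : d.contains (pvGetKey c "source") = false := by
        rw [hmem]
        rcases Bool.or_eq_false_iff.mp (Bool.eq_false_iff.mpr h) with ⟨_, h2⟩
        exact h2
      have hmem' : ∀ s,
          (d.insert (pvGetKey c "source") (PySem.Str.lower (pvGetKey c "claim"))).contains s
            = (seen ++ [pvGetKey c "source"]).contains s := by
        intro s
        rw [PySem.Dict.contains_insert, List.contains_append, hmem]
        by_cases hs : s = pvGetKey c "source" <;> simp [hs, Bool.or_comm]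
      rw [ih _ _ hmem',
        PySem.Dict.items_insert_of_not_contains d _ hnc]
      simp

-- A's second loop, started with a seen-set whose membership matches `seen`, appends the
-- formatted pairs, truncated to 5 notes in total.
theorem loop2_eq_take (cs : List (List (String × String))) :
    ∀ (st : PySem.Set String) (seen : List String) (notes : List String),
      (∀ s, PySem.Set.contains st s = seen.contains s) → notes.length < 5 →
      pvLoop2A cs st notes =
        notes ++ ((pvPairs cs seen).map (fun p => p.1 ++ ": " ++ p.2)).take (5 - notes.length) := by
  induction cs with
  | nil => intro st seen notes _ _; simp [pvLoop2A, pvPairs]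
  | cons c rest ih =>
    intro st seen notes hmem hlen
    simp only [pvLoop2A, pvPairs]
    by_cases h : (pvGetKey c "source" == "conversation_history" || seen.contains (pvGetKey c "source")) = true
    · rw [if_pos (by rw [hmem]; rw [Bool.or_comm] at h; exact h), if_pos h]
      exact ih st seen notes hmem hlen
    · have h' : (PySem.Set.contains st (pvGetKey c "source")
          || (pvGetKey c "source" == "conversation_history")) = false := by
        rw [hmem, Bool.or_comm]; exact Bool.eq_false_iff.mpr h
      rw [if_neg (by rw [h']; simp), if_neg h]
      by_cases h5 : 5 ≤ (notes ++ [pvGetKey c "source" ++ ": " ++ pvGetKey c "claim"]).length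
      · rw [if_pos h5]
        have h4 : notes.length = 4 := by simp at h5; omega
        simp [h4]
      · rw [if_neg h5]
        have hnotin : pvGetKey c "source" ∉ st := by
          have h3 := hmem (pvGetKey c "source")
          rcases Bool.or_eq_false_iff.mp h' with ⟨h2, _⟩
          intro hm
          rw [(PySem.Set.contains_iff st (pvGetKey c "source")).mpr hm] at h2
          simp at h2
        have hmem' : ∀ s, PySem.Set.contains (PySem.Set.add st (pvGetKey c "source")) s
            = (seen ++ [pvGetKey c "source"]).contains s := by
          intro s
          rw [PySem.Set.add_of_not_mem hnotin]
          simp only [PySem.Set.contains_eq_listContains] at hmem ⊢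
          rw [List.contains_append, List.contains_append, hmem]
        have hlen' : (notes ++ [pvGetKey c "source" ++ ": " ++ pvGetKey c "claim"]).length < 5 := by
          omega
        rw [ih _ _ _ hmem' hlen']
        have harith : 5 - notes.length
            = (5 - (notes ++ [pvGetKey c "source" ++ ": " ++ pvGetKey c "claim"]).length) + 1 := by
          simp at h5 ⊢; omega
        rw [harith]
        simp

-- Conflict equivalence on a list of claims: "more than one distinct value" is
-- "some value differs from the first".
theorem set_len_gt_one_iff (c0 : String) (rest : List String) :
    1 < (PySem.Set.ofList (c0 :: rest)).length ↔ rest.any (fun c => c != c0) = true := by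
  constructor
  · intro hlt
    by_contra hany
    have hall : ∀ c ∈ rest, c = c0 := by
      intro c hc
      by_contra hne
      exact hany (List.any_eq_true.mpr ⟨c, hc, by simpa using hne⟩)
    have hmem : ∀ a ∈ PySem.Set.ofList (c0 :: rest), a = c0 := by
      intro a ha
      rcases List.mem_cons.mp ((PySem.Set.mem_ofList _ _).mp ha) with h | h
      · exact h
      · exact hall a h
    have hnd := PySem.Set.nodup_ofList (xs := c0 :: rest)
    match hS : PySem.Set.ofList (c0 :: rest) with
    | [] => rw [hS] at hlt; simp at hlt
    | [a] => rw [hS] at hlt; simp at hlt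
    | a :: b :: t =>
      rw [hS] at hmem hnd
      have ha := hmem a (by simp)
      have hb := hmem b (by simp)
      rw [List.nodup_cons] at hnd
      exact hnd.1 (by rw [ha, hb]; simp)
  · intro hany
    rcases List.any_eq_true.mp hany with ⟨c, hc, hne⟩
    have hne' : c ≠ c0 := by simpa using hne
    have hc0 : c0 ∈ PySem.Set.ofList (c0 :: rest) := (PySem.Set.mem_ofList _ _).mpr (by simp)
    have hcS : c ∈ PySem.Set.ofList (c0 :: rest) := (PySem.Set.mem_ofList _ _).mpr (by simp [hc])
    match hS : PySem.Set.ofList (c0 :: rest) with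
    | [] => rw [hS] at hc0; simp at hc0
    | [a] =>
      rw [hS] at hc0 hcS
      simp at hc0 hcS
      exact absurd (hcS.trans hc0.symm) hne'
    | a :: b :: t => simp

-- ===== VERDICT (by name: the statement is the Claim_ definition above) =====
theorem conflict_notes_py_spec : Claim_equal_conflict_notes_py := by
  intro candidates _ _
  unfold Spec_conflict_notes_py conflict_notes_py conflict_notes_py_alt has_source_conflict_py
  have hmem0 : ∀ s : String, (PySem.Dict.empty : PySem.Dict String String).contains s
      = ([] : List String).contains s := by
    intro s; simp [PySem.Dict.contains_empty]
  have h1 := loop1_items candidates PySem.Dict.empty [] hmem0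
  have hitems : (pvLoop1A candidates PySem.Dict.empty).items
      = (pvPairs candidates []).map (fun p => (p.1, PySem.Str.lower p.2)) := by
    simpa using h1
  have hsize : (pvLoop1A candidates PySem.Dict.empty).size = (pvPairs candidates []).length := by
    simp [PySem.Dict.size, hitems]
  have hvals : (pvLoop1A candidates PySem.Dict.empty).values
      = (pvPairs candidates []).map (fun p => PySem.Str.lower p.2) := by
    simp [PySem.Dict.values, hitems, Function.comp_def]
  have hwalk := walk_eq_pairs candidates []
  rw [hwalk]
  have hmemS : ∀ s : String, PySem.Set.contains (PySem.Set.empty : PySem.Set String) s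
      = ([] : List String).contains s := by
    intro s; rfl
  match hp : pvPairs candidates [] with
  | [] => simp [hsize, hp]
  | [q] => simp [hsize, hp]
  | q :: r :: t =>
    have h2 := loop2_eq_take candidates PySem.Set.empty [] [] hmemS (by norm_num)
    rw [h2, hp]
    have hiff := set_len_gt_one_iff (PySem.Str.lower q.2)
      ((r :: t).map (fun p => PySem.Str.lower p.2))
    by_cases hany : ((r :: t).map (fun p => PySem.Str.lower p.2)).any
        (fun c => c != PySem.Str.lower q.2) = true
    · have hlt : 1 < (PySem.Set.ofList ((q :: r :: t).map (fun p => PySem.Str.lower p.2))).length := by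
        simpa using hiff.mpr hany
      simp only [List.map_cons] at hany hlt
      simp [hsize, hvals, hp, hlt, hany]
    · have hnlt : ¬ 1 < (PySem.Set.ofList ((q :: r :: t).map (fun p => PySem.Str.lower p.2))).length := by
        intro hl
        exact hany (hiff.mp (by simpa using hl))
      simp only [List.map_cons] at hany hnlt
      simp [hsize, hvals, hp, hnlt, hany]
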